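-- pv_equiv track=rewrite | github.com/Tagzzs/tagzzs | backend/app/services/chunking/chunker.py | _backtrack_to_word_start
-- ===== SOURCE A (Python) =====
-- def _backtrack_to_word_start(text: str, pos: int) -> int:
--     """
--     Backtrack from position to start of word.
--
--     Logic:
--     1. If at word boundary, return as-is
--     2. Otherwise, scan backward to find space/punctuation
--     """
--     if pos <= 0:
--         return 0
--     if pos >= len(text):
--         return len(text)
--
--     if text[pos] == " ":
--         return pos
--
--     current = pos
--     while current > 0 and text[current] not in (" ", "\n", "\t", ".", "!", "?"):
--         current -= 1
--
--     while current < len(text) and text[current] in (" ", "\n", "\t"):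
--         current += 1
--
--     return current
-- ===== SOURCE B (Python) =====
-- def _backtrack_to_word_start(text: str, pos: int) -> int:
--     """Forward single pass: remember the last boundary index in [0, pos]."""
--     n = len(text)
--     if pos <= 0:
--         return 0
--     if pos >= n:
--         return n
--     if text[pos] == " ":
--         return pos
--
--     current = 0
--     for i in range(pos + 1):
--         if text[i] in (" ", "\n", "\t", ".", "!", "?"):
--             current = i
--
--     while current < n and text[current] in (" ", "\n", "\t"):
--         current += 1
--
--     return current
-- ===== Notes on version B (the rewrite author's own statement) =====
-- stated objective: alternative
-- what changed: The backward while-loop searching for the nearest boundary is replaced by one forward pass over [0, pos] that records the last boundary index (defaulting to 0), keeping the guards and the forward whitespace-skip.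
import Mathlib
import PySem

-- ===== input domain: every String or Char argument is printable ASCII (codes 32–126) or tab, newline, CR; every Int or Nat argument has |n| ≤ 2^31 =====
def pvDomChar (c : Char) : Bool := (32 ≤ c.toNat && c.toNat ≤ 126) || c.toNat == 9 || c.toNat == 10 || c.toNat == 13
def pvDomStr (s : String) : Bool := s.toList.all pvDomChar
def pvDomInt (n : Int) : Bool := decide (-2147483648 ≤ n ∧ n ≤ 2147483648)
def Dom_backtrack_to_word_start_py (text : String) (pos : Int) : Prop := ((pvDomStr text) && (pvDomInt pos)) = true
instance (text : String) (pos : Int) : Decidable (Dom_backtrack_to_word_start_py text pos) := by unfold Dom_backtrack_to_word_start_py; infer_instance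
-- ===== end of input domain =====

-- B replaces A's backward boundary search by a forward scan over [0,pos] recording the last boundary index; return values agree on all inputs.
-- ===== PORT A =====
def pvBoundary (c : Char) : Bool := c = ' ' || c = '\n' || c = '\t' || c = '.' || c = '!' || c = '?'
def pvWs (c : Char) : Bool := c = ' ' || c = '\n' || c = '\t'

-- backward while-loop of A: while current > 0 and text[current] not a boundary: current -= 1
def pvBack (l : List Char) : Nat → Nat
  | 0 => 0
  | c + 1 => if pvBoundary (l.getD (c + 1) ' ') then c + 1 else pvBack l c

-- the final forward whitespace-skip loop (identical in A and B)
def pvFwd (l : List Char) (cur : Nat) : Nat :=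
  if h : cur < l.length ∧ pvWs (l.getD cur ' ') then pvFwd l (cur + 1) else cur
termination_by l.length - cur
decreasing_by omega

def backtrack_to_word_start_py (text : String) (pos : Int) : Int :=
  let l := text.toList
  if pos ≤ 0 then 0
  else if pos ≥ l.length then l.length
  else if l.getD pos.toNat ' ' = ' ' then pos
  else (pvFwd l (pvBack l pos.toNat) : Int)

-- ===== PORT B =====
def backtrack_to_word_start_py_alt (text : String) (pos : Int) : Int :=
  let l := text.toList
  if pos ≤ 0 then 0
  else if pos ≥ l.length then l.length
  else if l.getD pos.toNat ' ' = ' ' then pos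
  else (pvFwd l ((List.range (pos.toNat + 1)).foldl
          (fun cur i => if pvBoundary (l.getD i ' ') then i else cur) 0) : Int)

-- ===== PRECONDITION & SPEC =====
def Spec_backtrack_to_word_start_py (text : String) (pos : Int) (out : Int) : Prop := out = backtrack_to_word_start_py_alt text pos
instance (text : String) (pos : Int) (out : Int) : Decidable (Spec_backtrack_to_word_start_py text pos out) := by unfold Spec_backtrack_to_word_start_py; infer_instance

-- ===== CLAIM (what is proved, stated in full; the proofs are below) =====
def Claim_equal_backtrack_to_word_start_py : Prop := ∀ (text : String) (pos : Int), Dom_backtrack_to_word_start_py text pos → Spec_backtrack_to_word_start_py text pos (backtrack_to_word_start_py text pos)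

-- ===== LEMMAS AND PROOFS =====

-- ===== VERDICT (by name: the statement is the Claim_ definition above) =====
lemma pvBack_eq_foldl (l : List Char) (p : Nat) :
    (List.range (p + 1)).foldl (fun cur i => if pvBoundary (l.getD i ' ') then i else cur) 0
      = pvBack l p := by
  induction p with
  | zero => simp [List.range_succ, pvBack]
  | succ p ih =>
    rw [List.range_succ, List.foldl_append, ih]
    simp [pvBack, List.foldl]

theorem backtrack_to_word_start_py_spec : Claim_equal_backtrack_to_word_start_py := by
  intro text pos _
  unfold Spec_backtrack_to_word_start_py backtrack_to_word_start_py backtrack_to_word_start_py_alt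
  simp only [pvBack_eq_foldl]
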